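-- pv_equiv track=rewrite | github.com/GeorgyMkrtchyan/voice_emotion_classification | codes/demo_analysis_new.py | get_monotonic_tail
-- ===== SOURCE A (Python) =====
-- def get_monotonic_tail(v):
--     tail = v[-1:]
--     elem_pred = tail[-1] if len(tail) > 0 else None
--     for elem in v[-2::-1]:
--         if elem < elem_pred:
--             tail = [elem] + tail
--             elem_pred = elem
--         else:
--             break
--     return tail
-- ===== SOURCE B (Python) =====
-- def get_monotonic_tail(v):
--     if not v:
--         return []
--     i = len(v) - 1
--     while i > 0 and v[i - 1] < v[i]:
--         i -= 1
--     return v[i:]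
-- ===== Notes on version B (the rewrite author's own statement) =====
-- stated objective: alternative
-- what changed: Instead of materialising the reversed slice v[-2::-1] and repeatedly prepending to a growing list, B walks an index backwards to find where the strictly-increasing run starts and returns one final slice.
import Mathlib
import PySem

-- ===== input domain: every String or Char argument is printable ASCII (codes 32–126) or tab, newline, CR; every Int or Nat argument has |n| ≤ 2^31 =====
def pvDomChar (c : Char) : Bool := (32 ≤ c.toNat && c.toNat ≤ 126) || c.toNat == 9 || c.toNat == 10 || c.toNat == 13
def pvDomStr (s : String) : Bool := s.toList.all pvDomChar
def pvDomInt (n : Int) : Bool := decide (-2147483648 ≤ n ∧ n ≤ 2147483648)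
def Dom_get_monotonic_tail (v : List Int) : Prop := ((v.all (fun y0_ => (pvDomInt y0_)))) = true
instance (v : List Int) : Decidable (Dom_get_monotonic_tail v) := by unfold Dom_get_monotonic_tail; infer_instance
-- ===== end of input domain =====

-- B replaces A's reversed-slice walk with repeated list prepends by an index scan
-- that finds the start of the strictly increasing run and takes one final slice.

-- ===== PORT A =====
-- the 'for elem in v[-2::-1]: if elem < elem_pred: … else: break' loop; elem_pred is
-- None only when v is empty, in which case the loop body never runs (none branch unreachable)
def pvGoA : List Int → List Int → Option Int → List Int
  | [], tail, _ => tail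
  | elem :: rest, tail, some pred =>
      if elem < pred then pvGoA rest ([elem] ++ tail) (some elem) else tail
  | _ :: _, tail, none => tail

def get_monotonic_tail (v : List Int) : List Int :=
  -- tail = v[-1:]
  let tail := PySem.List.slice v (some (-1)) none
  -- elem_pred = tail[-1] if len(tail) > 0 else None
  let elem_pred : Option Int := if 0 < tail.length then PySem.List.pyGet? tail (-1) else none
  -- for elem in v[-2::-1]: …
  pvGoA ((PySem.List.slice? v (some (-2)) none (-1)).getD []) tail elem_pred

-- ===== PORT B =====
-- while i > 0 and v[i-1] < v[i]: i -= 1   (both indices are always in range,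
-- so pyGetD's default is never used)
def pvGoB (v : List Int) : Nat → Nat
  | 0 => 0
  | i + 1 =>
      if PySem.List.pyGetD v (i : Int) 0 < PySem.List.pyGetD v ((i : Int) + 1) 0
      then pvGoB v i else i + 1

def get_monotonic_tail_alt (v : List Int) : List Int :=
  if v.length = 0 then []
  else PySem.List.slice v (some ((pvGoB v (v.length - 1) : Nat) : Int)) none

-- ===== PRECONDITION & SPEC =====
def Spec_get_monotonic_tail (v : List Int) (out : List Int) : Prop := out = get_monotonic_tail_alt v
instance (v : List Int) (out : List Int) : Decidable (Spec_get_monotonic_tail v out) := by unfold Spec_get_monotonic_tail; infer_instance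

-- ===== CLAIM (what is proved, stated in full; the proofs are below) =====
def Claim_equal_get_monotonic_tail : Prop := ∀ (v : List Int), Dom_get_monotonic_tail v → Spec_get_monotonic_tail v (get_monotonic_tail v)

-- ===== LEMMAS AND PROOFS =====

-- the strictly-decreasing run both loops compute, read off the reversed prefix
def pvRun : List Int → Int → List Int
  | [], _ => []
  | y :: rest, p => if y < p then y :: pvRun rest y else []

theorem pvGoA_run (l : List Int) (tail : List Int) (p : Int) :
    pvGoA l tail (some p) = (pvRun l p).reverse ++ tail := by
  induction l generalizing tail p with
  | nil => simp [pvGoA, pvRun]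
  | cons y rest ih =>
      simp only [pvGoA, pvRun]
      by_cases h : y < p
      · simp [h, ih]
      · simp [h]

theorem filterMap_range_rev (ys : List Int) (j m : Nat) (hm : m ≤ j + 1) (hj : j < ys.length) :
    (List.range m).filterMap (fun (k : Nat) => ys[((j : Int) - (k : Int)).toNat]?) =
      ((ys.take (j + 1)).drop (j + 1 - m)).reverse := by
  induction m with
  | zero => simp
  | succ m ih =>
      rw [List.range_succ, List.filterMap_append, ih (by omega)]
      have hlt : j - m < ys.length := by omega
      have hlt' : j - m < (ys.take (j + 1)).length := by simp; omega
      have he : j + 1 - (m + 1) = j - m := by omega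
      rw [he, List.drop_eq_getElem_cons hlt']
      simp [show ((j : Int) - (m : Nat)).toNat = j - m from by omega,
        List.getElem?_eq_getElem hlt, List.getElem_take,
        show j - m + 1 = j + 1 - m from by omega]

-- v[-2::-1] is the reverse of the (len-1)-prefix
theorem slice_neg2_rev (xs : List Int) :
    PySem.List.slice? xs (some (-2)) none (-1) = some ((xs.take (xs.length - 1)).reverse) := by
  match xs with
  | [] => rfl
  | [_] => rfl
  | a :: b :: t =>
      have h1 : PySem.List.sliceIndices (a :: b :: t).length (some (-2)) none (-1)
          = ((t.length : Int), -1, -1) := by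
        simp only [PySem.List.sliceIndices, List.length_cons]
        norm_num
        omega
      simp only [PySem.List.slice?, h1]
      rw [if_neg (show ¬((-1:Int) = 0) from by norm_num)]
      rw [if_neg (show ¬((0:Int) < -1) from by norm_num),
        if_pos (show (-1:Int) < (t.length:Int) from by omega),
        show (((t.length:Int) - -1 + - -1 - 1) / - -1).toNat = t.length + 1 from by norm_num]
      have key := filterMap_range_rev (a :: b :: t) t.length (t.length + 1) (by omega) (by simp)
      simp only [Nat.sub_self, List.drop_zero] at key
      rw [show (fun (x : Nat) => (a :: b :: t)[((t.length:Int) + -1 * (x:Int)).toNat]?)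
            = (fun (k : Nat) => (a :: b :: t)[((t.length:Int) - (k:Int)).toNat]?) from
          funext fun k => by ring_nf]
      rw [key]
      simp

theorem pvGoB_drop (v : List Int) (i : Nat) (h : i < v.length) :
    v.drop (pvGoB v i) = (pvRun ((v.take i).reverse) v[i]).reverse ++ v.drop i := by
  induction i with
  | zero => simp [pvGoB, pvRun]
  | succ i ih =>
      have hi : i < v.length := by omega
      have htake : (v.take (i + 1)).reverse = v[i] :: (v.take i).reverse := by
        rw [List.take_add_one, List.getElem?_eq_getElem hi]
        simp
      rw [htake]
      simp only [pvGoB, pvRun]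
      have h1 : PySem.List.pyGetD v (i : Int) 0 = v[i] := by
        rw [PySem.List.pyGetD_natCast]; exact List.getD_eq_getElem v 0 hi
      have h2 : PySem.List.pyGetD v ((i : Int) + 1) 0 = v[i + 1] := by
        rw [show ((i : Nat) : Int) + 1 = (((i + 1 : Nat)) : Int) from by push_cast; ring,
          PySem.List.pyGetD_natCast]
        exact List.getD_eq_getElem v 0 h
      rw [h1, h2]
      by_cases hc : v[i] < v[i + 1]
      · rw [if_pos hc, if_pos hc, ih hi]
        rw [List.drop_eq_getElem_cons hi]
        simp
      · rw [if_neg hc, if_neg hc]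
        simp

-- ===== VERDICT (by name: the statement is the Claim_ definition above) =====
theorem get_monotonic_tail_spec : Claim_equal_get_monotonic_tail := by
  intro v _
  show get_monotonic_tail v = get_monotonic_tail_alt v
  match v with
  | [] => rfl
  | x :: xs =>
      have hlast : (x :: xs).length - 1 < (x :: xs).length := by simp
      have hdrop1 : (x :: xs).drop ((x :: xs).length - 1) = [(x :: xs)[(x :: xs).length - 1]] := by
        rw [List.drop_eq_getElem_cons hlast]
        have : (x :: xs).length - 1 + 1 = (x :: xs).length := by simp
        rw [this, List.drop_length]
      have htail : PySem.List.slice (x :: xs) (some (-1)) none =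
          [(x :: xs)[(x :: xs).length - 1]] := by
        rw [PySem.List.slice_some_none, PySem.List.clampIdx_neg_one]
        exact hdrop1
      have hpred : (if 0 < ([(x :: xs)[(x :: xs).length - 1]] : List Int).length
          then PySem.List.pyGet? [(x :: xs)[(x :: xs).length - 1]] (-1) else none)
          = some (x :: xs)[(x :: xs).length - 1] := by
        rw [if_pos (by simp)]; rfl
      unfold get_monotonic_tail
      rw [htail, slice_neg2_rev]
      dsimp only
      rw [hpred, Option.getD_some, pvGoA_run, ← hdrop1,
        ← pvGoB_drop (x :: xs) ((x :: xs).length - 1) hlast]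
      unfold get_monotonic_tail_alt
      rw [if_neg (by simp), PySem.List.slice_from (x :: xs) (Int.natCast_nonneg _)]
      simp
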